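-- pv_equiv track=rewrite | github.com/andrewdelmar/advent | Day 7/part2.py | has_valid_eq
-- ===== SOURCE A (Python) =====
-- def has_valid_eq(target, acc, parts):
--     if acc == target and not parts:
--         return True
--     if not parts or acc > target:
--         return False
--
--     part, *parts = parts;
--     valid_concat = has_valid_eq(target, int(str(acc) + str(part)), parts)
--     valid_add = has_valid_eq(target, acc + part, parts)
--     valid_mul = has_valid_eq(target, acc * part, parts)
--
--     return valid_concat or valid_add or valid_mul
-- ===== SOURCE B (Python) =====
-- def has_valid_eq(target, acc, parts):
--     # Breadth-first over the set of reachable accumulator values (deduplicated),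
--     # dropping values already above the target, instead of 3-way recursion.
--     vals = {acc}
--     for part in parts:
--         if not vals:
--             break
--         nxt = set()
--         for v in vals:
--             if v <= target:
--                 nxt.add(int(str(v) + str(part)))
--                 nxt.add(v + part)
--                 nxt.add(v * part)
--         vals = nxt
--     return target in vals
-- ===== Notes on version B (the rewrite author's own statement) =====
-- stated objective: alternative
-- what changed: A's 3-way recursion over every operator sequence is replaced by one left-to-right pass that maintains the deduplicated set of reachable accumulator values (values above the target dropped, stopping early when the set empties), then tests membership of the target; it trades A's depth-first call tree for breadth-first state sets of the same overall cost on typical inputs.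
-- outside the precondition, e.g. on has_valid_eq(5, 1, [9, -5]): A returns False, B returns False
import Mathlib
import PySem

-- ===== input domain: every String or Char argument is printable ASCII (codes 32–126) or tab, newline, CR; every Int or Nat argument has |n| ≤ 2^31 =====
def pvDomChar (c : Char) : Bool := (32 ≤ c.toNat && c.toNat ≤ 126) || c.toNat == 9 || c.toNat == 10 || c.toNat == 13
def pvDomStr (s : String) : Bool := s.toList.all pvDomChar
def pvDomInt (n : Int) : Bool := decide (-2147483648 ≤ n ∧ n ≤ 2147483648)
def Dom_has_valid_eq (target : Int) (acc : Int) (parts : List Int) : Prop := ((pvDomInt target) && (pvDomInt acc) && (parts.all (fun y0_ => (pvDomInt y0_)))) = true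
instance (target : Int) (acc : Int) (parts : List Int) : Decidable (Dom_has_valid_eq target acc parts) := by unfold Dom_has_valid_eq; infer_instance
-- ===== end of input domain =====

-- B replaces A's 3-way recursion by a breadth-first pass over the deduplicated set of
-- reachable accumulator values (objective: alternative algorithm, same values).

-- ===== PORT A =====
-- int(str(x) + str(y)); both Pythons contain this expression literally.
-- getD 0 is the total form: under Pre_ the parse never fails (every concatenated part is ≥ 0).
def pyConcat (x : Int) (y : Int) : Int :=
  (PySem.Int.ofStr? (PySem.Int.toStr x ++ PySem.Int.toStr y)).getD 0

def has_valid_eq (target : Int) (acc : Int) (parts : List Int) : Bool :=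
  -- Python's two early-return guards, specialized to each shape of `parts`:
  -- parts == []: 'acc == target and not parts' -> acc == target; 'not parts or ...' -> False.
  -- parts == part :: rest: first guard is False; second reduces to 'acc > target'.
  match parts with
  | [] => if acc = target then true else false
  | part :: rest =>
    if acc > target then false
    else
      let valid_concat := has_valid_eq target (pyConcat acc part) rest
      let valid_add := has_valid_eq target (acc + part) rest
      let valid_mul := has_valid_eq target (acc * part) rest
      valid_concat || valid_add || valid_mul

-- ===== PORT B =====
def has_valid_eq_alt (target : Int) (acc : Int) (parts : List Int) : Bool :=
  let vals : PySem.Set Int :=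
    parts.foldl
      (fun (vals : PySem.Set Int) part =>
        -- 'if not vals: break' — once empty the state never changes again
        if vals = [] then vals
        else vals.foldl
          (fun (nxt : PySem.Set Int) v =>
            if v ≤ target then
              PySem.Set.add (PySem.Set.add (PySem.Set.add nxt (pyConcat v part)) (v + part)) (v * part)
            else nxt)
          PySem.Set.empty)
      (PySem.Set.ofList [acc])
  PySem.Set.contains vals target

-- ===== PRECONDITION & SPEC =====
-- Pre_ excludes inputs on which Python A raises ValueError (int() applied to a string like "3-5"
-- when a negative part gets concatenated); the closed-form condition is conservative, so it also
-- excludes some negative-part inputs where pruning stops A before the negative part and both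
-- programs return False.
def Pre_has_valid_eq (target : Int) (acc : Int) (parts : List Int) : Prop :=
  (∀ p ∈ parts, 0 ≤ p) ∨ (parts ≠ [] ∧ acc > target)
instance (target : Int) (acc : Int) (parts : List Int) : Decidable (Pre_has_valid_eq target acc parts) := by unfold Pre_has_valid_eq; infer_instance

def pvWitness_has_valid_eq : Int × Int × List Int := (190, 1, [9, 10])

def Spec_has_valid_eq (target : Int) (acc : Int) (parts : List Int) (out : Bool) : Prop := out = has_valid_eq_alt target acc parts
instance (target : Int) (acc : Int) (parts : List Int) (out : Bool) : Decidable (Spec_has_valid_eq target acc parts out) := by unfold Spec_has_valid_eq; infer_instance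

-- ===== CLAIM (what is proved, stated in full; the proofs are below) =====
def Claim_equal_has_valid_eq : Prop := ∀ (target : Int) (acc : Int) (parts : List Int), Dom_has_valid_eq target acc parts → Pre_has_valid_eq target acc parts → Spec_has_valid_eq target acc parts (has_valid_eq target acc parts)

-- ===== LEMMAS AND PROOFS =====

-- unfolding lemmas for the recursive port A
lemma hv_nil (t a : Int) : has_valid_eq t a [] = decide (a = t) := by
  by_cases h : a = t <;> simp [has_valid_eq, h]

lemma hv_cons (t a p : Int) (rest : List Int) :
    has_valid_eq t a (p :: rest) =
      if a > t then false
      else (has_valid_eq t (pyConcat a p) rest || has_valid_eq t (a + p) rest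
            || has_valid_eq t (a * p) rest) := by
  rfl

-- membership in one BFS step
lemma mem_step (t p x : Int) (l : List Int) (s0 : PySem.Set Int) :
    x ∈ l.foldl
        (fun (nxt : PySem.Set Int) v =>
          if v ≤ t then
            PySem.Set.add (PySem.Set.add (PySem.Set.add nxt (pyConcat v p)) (v + p)) (v * p)
          else nxt) s0
      ↔ x ∈ s0 ∨ ∃ v ∈ l, v ≤ t ∧ (x = pyConcat v p ∨ x = v + p ∨ x = v * p) := by
  induction l generalizing s0 with
  | nil => simp
  | cons v vs ih =>
    simp only [List.foldl_cons]
    by_cases hv : v ≤ t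
    · rw [if_pos hv, ih]
      simp only [PySem.Set.mem_add, List.mem_cons]
      constructor
      · rintro ((((h | h) | h) | h) | ⟨w, hw, hwt, hx⟩)
        · exact Or.inl h
        · exact Or.inr ⟨v, Or.inl rfl, hv, Or.inl h⟩
        · exact Or.inr ⟨v, Or.inl rfl, hv, Or.inr (Or.inl h)⟩
        · exact Or.inr ⟨v, Or.inl rfl, hv, Or.inr (Or.inr h)⟩
        · exact Or.inr ⟨w, Or.inr hw, hwt, hx⟩
      · rintro (h | ⟨w, (rfl | hw), hwt, hx⟩)
        · exact Or.inl (Or.inl (Or.inl (Or.inl h)))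
        · rcases hx with h | h | h
          · exact Or.inl (Or.inl (Or.inl (Or.inr h)))
          · exact Or.inl (Or.inl (Or.inr h))
          · exact Or.inl (Or.inr h)
        · exact Or.inr ⟨w, hw, hwt, hx⟩
    · rw [if_neg hv, ih]
      simp only [List.mem_cons]
      constructor
      · rintro (h | ⟨w, hw, hwt, hx⟩)
        · exact Or.inl h
        · exact Or.inr ⟨w, Or.inr hw, hwt, hx⟩
      · rintro (h | ⟨w, (rfl | hw), hwt, hx⟩)
        · exact Or.inl h
        · exact absurd hwt hv
        · exact Or.inr ⟨w, hw, hwt, hx⟩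

-- the BFS fold reaches t from some start in s iff A succeeds from some start in s
lemma reach (t : Int) (ps : List Int) : ∀ (s : PySem.Set Int),
    (t ∈ ps.foldl
        (fun (vals : PySem.Set Int) part =>
          vals.foldl
            (fun (nxt : PySem.Set Int) v =>
              if v ≤ t then
                PySem.Set.add (PySem.Set.add (PySem.Set.add nxt (pyConcat v part)) (v + part)) (v * part)
              else nxt)
            PySem.Set.empty) s)
      ↔ ∃ a ∈ s, has_valid_eq t a ps = true := by
  induction ps with
  | nil => intro s; simp [hv_nil]
  | cons p rest ih =>
    intro s
    simp only [List.foldl_cons]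
    rw [ih]
    constructor
    · rintro ⟨b, hb, hres⟩
      rcases (mem_step t p b s PySem.Set.empty).1 hb with h | ⟨v, hvs, hvt, hb3⟩
      · simp [PySem.Set.empty] at h
      · refine ⟨v, hvs, ?_⟩
        rw [hv_cons]
        have : ¬ v > t := by omega
        simp only [this, if_false]
        rcases hb3 with h | h | h <;> subst h <;> simp [hres]
    · rintro ⟨a, ha, hres⟩
      rw [hv_cons] at hres
      by_cases hat : a > t
      · simp [hat] at hres
      · simp only [hat, if_false, Bool.or_eq_true] at hres
        have hle : a ≤ t := by omega
        rcases hres with (h | h) | h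
        · exact ⟨pyConcat a p, (mem_step t p _ s PySem.Set.empty).2 (Or.inr ⟨a, ha, hle, Or.inl rfl⟩), h⟩
        · exact ⟨a + p, (mem_step t p _ s PySem.Set.empty).2 (Or.inr ⟨a, ha, hle, Or.inr (Or.inl rfl)⟩), h⟩
        · exact ⟨a * p, (mem_step t p _ s PySem.Set.empty).2 (Or.inr ⟨a, ha, hle, Or.inr (Or.inr rfl)⟩), h⟩

-- the 'break' guard is extensionally redundant: one step from the empty set is the empty set
lemma guard_step_eq (target : Int) :
    (fun (vals : PySem.Set Int) part =>
        if vals = [] then vals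
        else vals.foldl
          (fun (nxt : PySem.Set Int) v =>
            if v ≤ target then
              PySem.Set.add (PySem.Set.add (PySem.Set.add nxt (pyConcat v part)) (v + part)) (v * part)
            else nxt)
          PySem.Set.empty)
      = (fun (vals : PySem.Set Int) part =>
        vals.foldl
          (fun (nxt : PySem.Set Int) v =>
            if v ≤ target then
              PySem.Set.add (PySem.Set.add (PySem.Set.add nxt (pyConcat v part)) (v + part)) (v * part)
            else nxt)
          PySem.Set.empty) := by
  funext s p
  by_cases h : s = []
  · subst h; rfl
  · rw [if_neg h]

-- ===== VERDICT (by name: the statement is the Claim_ definition above) =====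
theorem has_valid_eq_spec : Claim_equal_has_valid_eq := by
  intro target acc parts _ _
  unfold Spec_has_valid_eq has_valid_eq_alt
  rw [guard_step_eq, Bool.eq_iff_iff, PySem.Set.contains_iff, reach]
  simp [PySem.Set.ofList]
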